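-- pv_equiv track=rewrite | github.com/InstituteforDiseaseModeling/covasim | tests/test_immunity.py | get_ind_of_min_value
-- ===== SOURCE A (Python) =====
-- def get_ind_of_min_value(list, time):
--     ind = None
--     for place, t in enumerate(list):
--         if time >= t:
--             ind = place
--
--     if ind is None:
--         errormsg = f'{time} is not within the list of times'
--         raise ValueError(errormsg)
--     return ind
-- ===== SOURCE B (Python) =====
-- def get_ind_of_min_value(list, time):
--     for i in range(len(list) - 1, -1, -1):
--         if time >= list[i]:
--             return i
--     errormsg = f'{time} is not within the list of times'
--     raise ValueError(errormsg)
-- ===== Notes on version B (the rewrite author's own statement) =====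
-- stated objective: alternative
-- what changed: Replaces A's full forward scan that keeps overwriting the last matching index with a reverse index loop that returns the first (i.e. last) matching index immediately, short-circuiting the scan.
import Mathlib
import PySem

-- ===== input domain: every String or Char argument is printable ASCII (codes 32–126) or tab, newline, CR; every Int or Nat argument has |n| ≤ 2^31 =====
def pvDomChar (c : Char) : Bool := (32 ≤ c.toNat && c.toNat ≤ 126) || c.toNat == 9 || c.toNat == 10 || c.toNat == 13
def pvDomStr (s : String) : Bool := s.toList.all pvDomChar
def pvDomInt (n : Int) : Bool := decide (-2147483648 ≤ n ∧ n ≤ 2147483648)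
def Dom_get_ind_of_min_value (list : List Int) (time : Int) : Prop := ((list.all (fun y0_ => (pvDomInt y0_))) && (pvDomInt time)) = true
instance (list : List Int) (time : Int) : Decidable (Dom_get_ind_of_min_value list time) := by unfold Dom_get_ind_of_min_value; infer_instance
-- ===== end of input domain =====

-- B replaces A's accumulate-last forward scan with a short-circuiting reverse scan (alternative decomposition, same return value).

-- ===== PORT A =====
-- A: ind = None; for place, t in enumerate(list): if time >= t: ind = place; raise if ind is None.
-- The `raise ValueError` branch (ind = none) is excluded by Pre_; the match arm for none is never reached there.
def get_ind_of_min_value (list : List Int) (time : Int) : Int :=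
  match (PySem.List.enumerate list).foldl
      (fun ind p => if time ≥ p.2 then some p.1 else ind) (none : Option Int) with
  | some i => i
  | none => 0

-- ===== PORT B =====
-- B: for i in range(len(list)-1, -1, -1): if time >= list[i]: return i; raise.
-- The fuel k is the number of indices still to try; index k-1 is tried first. k = 0 is the raise, excluded by Pre_.
def altLoop (list : List Int) (time : Int) : Nat → Int
  | 0 => 0
  | k+1 => if time ≥ list.getD k 0 then (k : Int) else altLoop list time k

def get_ind_of_min_value_alt (list : List Int) (time : Int) : Int :=
  altLoop list time list.length

-- ===== PRECONDITION & SPEC =====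
-- Pre_ excludes exactly the inputs on which A raises ValueError (no element ≤ time); B raises the same error there.
def Pre_get_ind_of_min_value (list : List Int) (time : Int) : Prop := ∃ x ∈ list, time ≥ x
instance (list : List Int) (time : Int) : Decidable (Pre_get_ind_of_min_value list time) := by unfold Pre_get_ind_of_min_value; infer_instance
def pvWitness_get_ind_of_min_value : List Int × Int := ([3, 1, 4], 2)

def Spec_get_ind_of_min_value (list : List Int) (time : Int) (out : Int) : Prop := out = get_ind_of_min_value_alt list time
instance (list : List Int) (time : Int) (out : Int) : Decidable (Spec_get_ind_of_min_value list time out) := by unfold Spec_get_ind_of_min_value; infer_instance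

-- ===== CLAIM (what is proved, stated in full; the proofs are below) =====
def Claim_equal_get_ind_of_min_value : Prop := ∀ (list : List Int) (time : Int), Dom_get_ind_of_min_value list time → Pre_get_ind_of_min_value list time → Spec_get_ind_of_min_value list time (get_ind_of_min_value list time)

-- ===== LEMMAS AND PROOFS =====

-- Appending an element does not change B's loop on fuel that only reaches the old elements.
theorem altLoop_append (l : List Int) (a time : Int) :
    ∀ k, k ≤ l.length → altLoop (l ++ [a]) time k = altLoop l time k := by
  intro k
  induction k with
  | zero => intro _; rfl
  | succ k ih =>
    intro hk
    have hlt : k < l.length := by omega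
    have hget : (l ++ [a]).getD k 0 = l.getD k 0 := by
      simp [List.getD, List.getElem?_append_left hlt]
    simp only [altLoop, hget, ih (by omega)]

-- If some element is ≤ time, A's fold computes exactly B's reverse-scan answer.
theorem fold_eq_alt (time : Int) : ∀ l : List Int, (∃ x ∈ l, time ≥ x) →
    (PySem.List.enumerate l).foldl
      (fun ind p => if time ≥ p.2 then some p.1 else ind) (none : Option Int)
      = some (altLoop l time l.length) := by
  intro l
  induction l using List.reverseRecOn with
  | nil => rintro ⟨x, hx, -⟩; simp at hx
  | append_singleton l a ih =>
    intro hex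
    have hget : (l ++ [a]).getD l.length 0 = a := by
      simp [List.getD]
    have hfold : (PySem.List.enumerate (l ++ [a])).foldl
        (fun ind p => if time ≥ p.2 then some p.1 else ind) (none : Option Int)
        = if time ≥ a then some ((l.length : Int))
          else (PySem.List.enumerate l).foldl
            (fun ind p => if time ≥ p.2 then some p.1 else ind) (none : Option Int) := by
      rw [show PySem.List.enumerate (l ++ [a]) = PySem.List.enumerate l 0 ++ [((0 : Int) + l.length, a)] from by
        rw [PySem.List.enumerate_append]; rfl]
      simp [List.foldl_append]
    by_cases ha : time ≥ a
    · simp only [hfold, if_pos ha, List.length_append, List.length_singleton]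
      simp only [altLoop, hget, if_pos ha]
    · simp only [hfold, if_neg ha]
      have hex' : ∃ x ∈ l, time ≥ x := by
        rcases hex with ⟨x, hx, hxt⟩
        rcases List.mem_append.mp hx with h | h
        · exact ⟨x, h, hxt⟩
        · simp at h; subst h; exact absurd hxt ha
      rw [ih hex']
      have : altLoop (l ++ [a]) time (l ++ [a]).length = altLoop l time l.length := by
        simp only [List.length_append, List.length_singleton]
        simp only [altLoop, hget, if_neg ha]
        exact altLoop_append l a time l.length le_rfl
      rw [this]

-- ===== VERDICT (by name: the statement is the Claim_ definition above) =====
theorem get_ind_of_min_value_spec : Claim_equal_get_ind_of_min_value := by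
  intro list time _ hpre
  unfold Spec_get_ind_of_min_value get_ind_of_min_value get_ind_of_min_value_alt
  rw [fold_eq_alt time list hpre]
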